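-- pv_equiv track=rewrite | github.com/ninjra/statistics_harness | scripts/redteam_ids_matrix.py | _collect_test_evidence
-- ===== SOURCE A (Python) =====
-- def _collect_test_evidence(
--     candidates: list[str],
--     test_text_index: dict[str, str],
-- ) -> list[str]:
--     if not candidates:
--         return []
--     out: list[str] = []
--     for path, txt in test_text_index.items():
--         if any(c and (c in txt) for c in candidates):
--             out.append(path)
--     return sorted(out)
-- ===== SOURCE B (Python) =====
-- def _collect_test_evidence(
--     candidates: list[str],
--     test_text_index: dict[str, str],
-- ) -> list[str]:
--     remaining = list(test_text_index.items())
--     matched: list[str] = []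
--     for c in candidates:
--         if not c:
--             continue
--         hits = [p for p, t in remaining if c in t]
--         if hits:
--             matched += hits
--             remaining = [(p, t) for p, t in remaining if c not in t]
--     return sorted(matched)
-- ===== Notes on version B (the rewrite author's own statement) =====
-- stated objective: alternative
-- what changed: B transposes the loop nest: it scans candidate-major over a shrinking worklist, each candidate partitioning the remaining items into emitted hits and survivors (so a path matched once is never scanned again), and sorts the collected hits at the end, instead of A's path-major any-candidate filter followed by a sort.
import Mathlib
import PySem

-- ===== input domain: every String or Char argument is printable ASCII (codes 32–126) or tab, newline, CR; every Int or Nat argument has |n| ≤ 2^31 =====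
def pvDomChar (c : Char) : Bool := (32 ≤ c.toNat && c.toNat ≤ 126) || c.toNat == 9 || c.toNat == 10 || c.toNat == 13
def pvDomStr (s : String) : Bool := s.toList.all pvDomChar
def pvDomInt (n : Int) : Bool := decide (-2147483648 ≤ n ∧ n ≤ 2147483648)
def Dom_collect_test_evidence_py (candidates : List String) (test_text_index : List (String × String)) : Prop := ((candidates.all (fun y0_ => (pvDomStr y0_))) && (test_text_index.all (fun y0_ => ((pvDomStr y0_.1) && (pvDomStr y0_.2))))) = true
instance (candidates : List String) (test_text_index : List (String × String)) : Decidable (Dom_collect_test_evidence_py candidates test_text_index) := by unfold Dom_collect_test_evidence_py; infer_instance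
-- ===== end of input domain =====

-- B transposes the loop nest: a candidate-major scan over a shrinking worklist, each
-- candidate partitioning the remaining items into emitted hits and survivors, sorted at
-- the end, instead of A's path-major any-candidate filter then sort (objective: alternative).


-- ===== PORT A =====
def collect_test_evidence_py (candidates : List String) (test_text_index : List (String × String)) : List String :=
  if candidates = [] then []
  else
    let out := ((PySem.Dict.ofList test_text_index).items).foldl
      (fun out p =>
        if candidates.any (fun c => decide (c ≠ "") && PySem.Str.isIn c p.2) then out ++ [p.1]
        else out) []
    PySem.List.sorted out (fun x => x) false

-- ===== PORT B =====
def collect_test_evidence_py_alt (candidates : List String) (test_text_index : List (String × String)) : List String :=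
  let st := candidates.foldl
    (fun (st : List (String × String) × List String) c =>
      if c = "" then st
      else
        let hits := (st.1.filter (fun p => PySem.Str.isIn c p.2)).map Prod.fst
        if hits = [] then st
        else (st.1.filter (fun p => !PySem.Str.isIn c p.2), st.2 ++ hits))
    ((PySem.Dict.ofList test_text_index).items, [])
  PySem.List.sorted st.2 (fun x => x) false

-- ===== PRECONDITION & SPEC =====
def Spec_collect_test_evidence_py (candidates : List String) (test_text_index : List (String × String)) (out : List String) : Prop := out = collect_test_evidence_py_alt candidates test_text_index
instance (candidates : List String) (test_text_index : List (String × String)) (out : List String) : Decidable (Spec_collect_test_evidence_py candidates test_text_index out) := by unfold Spec_collect_test_evidence_py; infer_instance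

-- ===== CLAIM (what is proved, stated in full; the proofs are below) =====
def Claim_equal_collect_test_evidence_py : Prop := ∀ (candidates : List String) (test_text_index : List (String × String)), Dom_collect_test_evidence_py candidates test_text_index → Spec_collect_test_evidence_py candidates test_text_index (collect_test_evidence_py candidates test_text_index)

-- ===== LEMMAS AND PROOFS =====

-- proof-side name for B's loop body (definitionally the lambda in the port)
def pvStep (st : List (String × String) × List String) (c : String) :
    List (String × String) × List String :=
  if c = "" then st
  else
    let hits := (st.1.filter (fun p => PySem.Str.isIn c p.2)).map Prod.fst
    if hits = [] then st
    else (st.1.filter (fun p => !PySem.Str.isIn c p.2), st.2 ++ hits)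

lemma pvStep_skip (st : List (String × String) × List String) {c : String} (hc : c = "") :
    pvStep st c = st := by
  unfold pvStep; rw [if_pos hc]

lemma pvStep_none (st : List (String × String) × List String) {c : String} (hc : c ≠ "")
    (hh : (st.1.filter (fun p => PySem.Str.isIn c p.2)).map Prod.fst = []) :
    pvStep st c = st := by
  unfold pvStep
  rw [if_neg hc]
  show (if (st.1.filter (fun p => PySem.Str.isIn c p.2)).map Prod.fst = [] then st else _) = st
  rw [if_pos hh]

lemma pvStep_hit (st : List (String × String) × List String) {c : String} (hc : c ≠ "")
    (hh : (st.1.filter (fun p => PySem.Str.isIn c p.2)).map Prod.fst ≠ []) :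
    pvStep st c = (st.1.filter (fun p => !PySem.Str.isIn c p.2),
      st.2 ++ (st.1.filter (fun p => PySem.Str.isIn c p.2)).map Prod.fst) := by
  unfold pvStep
  rw [if_neg hc]
  show (if (st.1.filter (fun p => PySem.Str.isIn c p.2)).map Prod.fst = [] then st else _) = _
  rw [if_neg hh]

-- the candidate loop: membership in the collected hit list
lemma mem_outer (cs : List String) (rem : List (String × String)) (acc : List String)
    (x : String) :
    (x ∈ (cs.foldl pvStep (rem, acc)).2)
    ↔ x ∈ acc ∨ ∃ p ∈ rem, x = p.1 ∧ ∃ c ∈ cs, c ≠ "" ∧ PySem.Str.isIn c p.2 = true := by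
  induction cs generalizing rem acc with
  | nil => simp
  | cons c cs ih =>
      simp only [List.foldl_cons]
      by_cases hc : c = ""
      · rw [pvStep_skip _ hc, ih]
        constructor
        · rintro (h | ⟨p, hp, hx, c', hc', h⟩)
          · exact Or.inl h
          · exact Or.inr ⟨p, hp, hx, c', List.mem_cons_of_mem _ hc', h⟩
        · rintro (h | ⟨p, hp, hx, c', hc', hne, h⟩)
          · exact Or.inl h
          · rcases List.mem_cons.mp hc' with rfl | hc''
            · exact absurd hc hne
            · exact Or.inr ⟨p, hp, hx, c', hc'', hne, h⟩
      · by_cases hh : (rem.filter (fun p => PySem.Str.isIn c p.2)).map Prod.fst = []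
        · have hnone : ∀ p ∈ rem, PySem.Str.isIn c p.2 = false := by
            intro p hp
            by_contra hne
            have : p ∈ rem.filter (fun p => PySem.Str.isIn c p.2) :=
              List.mem_filter.mpr ⟨hp, by simpa using hne⟩
            exact absurd (List.map_eq_nil_iff.mp hh ▸ this) (List.not_mem_nil)
          rw [pvStep_none _ hc hh, ih]
          constructor
          · rintro (h | ⟨p, hp, hx, c', hc', h⟩)
            · exact Or.inl h
            · exact Or.inr ⟨p, hp, hx, c', List.mem_cons_of_mem _ hc', h⟩
          · rintro (h | ⟨p, hp, hx, c', hc', hne, h⟩)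
            · exact Or.inl h
            · rcases List.mem_cons.mp hc' with rfl | hc''
              · exact (Bool.false_ne_true ((hnone p hp) ▸ h)).elim
              · exact Or.inr ⟨p, hp, hx, c', hc'', hne, h⟩
        · rw [pvStep_hit _ hc hh, ih]
          simp only [List.mem_append, List.mem_map, List.mem_filter]
          constructor
          · rintro ((h | ⟨p, ⟨hp, hin⟩, hx⟩) | ⟨p, ⟨hp, hnin⟩, hx, c', hc', hne, h⟩)
            · exact Or.inl h
            · exact Or.inr ⟨p, hp, hx.symm, c, List.mem_cons_self .., hc, hin⟩
            · exact Or.inr ⟨p, hp, hx, c', List.mem_cons_of_mem _ hc', hne, h⟩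
          · rintro (h | ⟨p, hp, hx, c', hc', hne, h⟩)
            · exact Or.inl (Or.inl h)
            · rcases List.mem_cons.mp hc' with rfl | hc''
              · exact Or.inl (Or.inr ⟨p, ⟨hp, h⟩, hx.symm⟩)
              · by_cases hin : PySem.Str.isIn c p.2 = true
                · exact Or.inl (Or.inr ⟨p, ⟨hp, hin⟩, hx.symm⟩)
                · exact Or.inr ⟨p, ⟨hp, by simpa using hin⟩, hx, c', hc'', hne, h⟩

-- appending a split-off filtered part back is a permutation of the original
lemma pv_perm_split {A B : Type} (f : A -> B) (q : A -> Bool) (acc : List B) (l : List A) :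
    ((acc ++ (l.filter q).map f) ++ (l.filter (fun x => !q x)).map f).Perm (acc ++ l.map f) := by
  rw [List.append_assoc, ← List.map_append]
  exact List.Perm.append_left acc ((List.filter_append_perm q l).map f)

-- hits and survivors together stay a permutation of the worklist: no duplicates appear
lemma nodup_outer (cs : List String) (rem : List (String × String)) (acc : List String)
    (h : (acc ++ rem.map Prod.fst).Nodup) :
    ((cs.foldl pvStep (rem, acc)).2 ++ (cs.foldl pvStep (rem, acc)).1.map Prod.fst).Nodup := by
  induction cs generalizing rem acc with
  | nil => exact h
  | cons c cs ih =>
      simp only [List.foldl_cons]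
      by_cases hc : c = ""
      · rw [pvStep_skip _ hc]; exact ih _ _ h
      · by_cases hh : (rem.filter (fun p => PySem.Str.isIn c p.2)).map Prod.fst = []
        · rw [pvStep_none _ hc hh]; exact ih _ _ h
        · rw [pvStep_hit _ hc hh]
          exact ih _ _ ((pv_perm_split Prod.fst
            (fun p => PySem.Str.isIn c p.2) acc rem).nodup_iff.mpr h)

-- two nodup lists with the same elements have the same sorted order
lemma sorted_eq_of_perm_nodup (xs ys : List String) (h : xs.Perm ys) (hy : ys.Nodup) :
    PySem.List.sorted xs (fun x => x) false = PySem.List.sorted ys (fun x => x) false := by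
  have hpw : (PySem.List.sorted ys (fun x => x) false).Pairwise (· ≤ ·) :=
    PySem.List.sorted_pairwise ys (fun x : String => x)
  have hperm : (PySem.List.sorted ys (fun x => x) false).Perm ys :=
    PySem.List.sorted_perm ys _ _
  have hnd : (PySem.List.sorted ys (fun x => x) false).Nodup := hperm.nodup_iff.mpr hy
  have hlt : (PySem.List.sorted ys (fun x => x) false).Pairwise (· < ·) :=
    (hpw.and hnd).imp (fun h => lt_of_le_of_ne h.1 h.2)
  exact PySem.List.sorted_eq_of_perm_of_pairwise_lt xs _ (fun x => x)
    (hperm.trans h.symm) hlt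

-- ===== VERDICT (by name: the statement is the Claim_ definition above) =====
theorem collect_test_evidence_py_spec : Claim_equal_collect_test_evidence_py := by
  intro candidates tti _
  unfold Spec_collect_test_evidence_py
  simp only [collect_test_evidence_py, collect_test_evidence_py_alt]
  have hstep : (fun (st : List (String × String) × List String) c =>
      if c = "" then st
      else
        let hits := (st.1.filter (fun p => PySem.Str.isIn c p.2)).map Prod.fst
        if hits = [] then st
        else (st.1.filter (fun p => !PySem.Str.isIn c p.2), st.2 ++ hits)) = pvStep := rfl
  rw [hstep]
  have hndk : (PySem.Dict.ofList tti).keys.Nodup := PySem.Dict.nodup_keys_ofList tti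
  have hkeys : (PySem.Dict.ofList tti).keys = (PySem.Dict.ofList tti).items.map Prod.fst := rfl
  have hnd0 : (([] : List String) ++ (PySem.Dict.ofList tti).items.map Prod.fst).Nodup := by
    rw [List.nil_append]; exact hkeys ▸ hndk
  by_cases hc : candidates = []
  · subst hc
    simp [PySem.List.sorted]
  · rw [if_neg hc]
    rw [PySem.List.foldl_append_if
      (fun p : String × String => candidates.any (fun c => decide (c ≠ "") && PySem.Str.isIn c p.2))
      Prod.fst ((PySem.Dict.ofList tti).items) [], List.nil_append]
    apply sorted_eq_of_perm_nodup
    · -- same members, both nodup → permutation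
      apply (List.perm_ext_iff_of_nodup _ _).mpr
      · intro x
        rw [mem_outer]
        simp only [List.mem_map, List.mem_filter, List.any_eq_true, Bool.and_eq_true,
          decide_eq_true_eq]
        constructor
        · rintro ⟨p, ⟨hp, c, hcmem, hne, hi⟩, hx⟩
          exact Or.inr ⟨p, hp, hx.symm, c, hcmem, hne, hi⟩
        · rintro (h | ⟨p, hp, hx, c, hcmem, hne, hi⟩)
          · exact absurd h (List.not_mem_nil)
          · exact ⟨p, ⟨hp, c, hcmem, hne, hi⟩, hx.symm⟩
      · exact (hkeys ▸ hndk).sublist (List.filter_sublist.map Prod.fst)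
      · exact (nodup_outer candidates _ [] hnd0).of_append_left
    · exact (nodup_outer candidates _ [] hnd0).of_append_left
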